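-- pv_equiv track=rewrite | github.com/jialing3/corner_cases | Relue/Eu90.py | check_if_all_squares_are_covered
-- ===== SOURCE A (Python) =====
-- def flip_6_or_9(cube):
--     if '6' in cube:
--         cube.add('9')
--     if '9' in cube:
--         cube.add('6')
--     return
--
-- def check_if_all_squares_are_covered(cube_0, cube_1, lst_of_squares):
--     # Ideally, should have kept cube_0 and cube_1 intact
--     flip_6_or_9(cube_0)
--     flip_6_or_9(cube_1)
--
--     # bottom-up
--     all_numbers_formed = set()
--     for digit_0 in cube_0:
--         for digit_1 in cube_1:
--             all_numbers_formed.add(digit_0 + digit_1)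
--             all_numbers_formed.add(digit_1 + digit_0)
--     for square_num in lst_of_squares:
--         if square_num not in all_numbers_formed:
--             return False
--     return True
-- ===== SOURCE B (Python) =====
-- def check_if_all_squares_are_covered(cube_0, cube_1, lst_of_squares):
--     # Same in-place mutation as the original: a cube seeing a 6 or a 9 gets both.
--     for cube in (cube_0, cube_1):
--         if '6' in cube or '9' in cube:
--             cube.update(('6', '9'))
--     # Query each target directly by trying every prefix/suffix split,
--     # instead of materialising the whole cross-product set.
--     return all(
--         any((s[:i] in cube_0 and s[i:] in cube_1) or
--             (s[:i] in cube_1 and s[i:] in cube_0)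
--             for i in range(len(s) + 1))
--         for s in lst_of_squares)
-- ===== Notes on version B (the rewrite author's own statement) =====
-- stated objective: faster
-- what changed: Instead of materialising the full cross-product set of all concatenations and then testing membership, B checks each square directly by trying every prefix/suffix split against the two cube sets; the 6/9 mutation of the cubes is kept.
import Mathlib
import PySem

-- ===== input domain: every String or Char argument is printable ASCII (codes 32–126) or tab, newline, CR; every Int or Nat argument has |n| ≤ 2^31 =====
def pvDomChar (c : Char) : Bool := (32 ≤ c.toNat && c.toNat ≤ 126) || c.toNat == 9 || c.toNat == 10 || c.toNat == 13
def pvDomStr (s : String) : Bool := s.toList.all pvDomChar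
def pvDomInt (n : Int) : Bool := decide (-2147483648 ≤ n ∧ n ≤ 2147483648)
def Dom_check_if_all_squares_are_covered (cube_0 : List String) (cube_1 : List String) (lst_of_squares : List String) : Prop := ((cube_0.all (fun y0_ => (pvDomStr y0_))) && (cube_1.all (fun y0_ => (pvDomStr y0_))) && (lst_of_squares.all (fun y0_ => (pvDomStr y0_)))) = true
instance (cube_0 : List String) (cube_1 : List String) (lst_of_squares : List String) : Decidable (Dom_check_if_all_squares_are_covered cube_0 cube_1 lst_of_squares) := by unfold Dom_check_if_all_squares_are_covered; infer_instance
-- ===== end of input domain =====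

-- B replaces 'build the cross-product set, then membership tests' by a direct per-square
-- prefix/suffix-split query (measured faster in a timing run). A mutates its set
-- arguments in place (adds '6'/'9'); B performs the same mutation; the theorems here are
-- about the RETURN value only.

-- ===== PORT A =====
def flip_6_or_9 (cube : PySem.Set String) : PySem.Set String :=
  let cube := if PySem.Set.contains cube "6" then PySem.Set.add cube "9" else cube
  if PySem.Set.contains cube "9" then PySem.Set.add cube "6" else cube

def pvFormed (cube_0 cube_1 : PySem.Set String) : PySem.Set String :=
  cube_0.foldl (fun acc d0 =>
    cube_1.foldl (fun acc d1 =>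
      PySem.Set.add (PySem.Set.add acc (d0 ++ d1)) (d1 ++ d0)) acc) PySem.Set.empty

def pvLoopA (formed : PySem.Set String) : List String → Bool
  | [] => true
  | s :: rest => if !(PySem.Set.contains formed s) then false else pvLoopA formed rest

def check_if_all_squares_are_covered (cube_0 : List String) (cube_1 : List String) (lst_of_squares : List String) : Bool :=
  let cube_0 := flip_6_or_9 cube_0
  let cube_1 := flip_6_or_9 cube_1
  pvLoopA (pvFormed cube_0 cube_1) lst_of_squares

-- ===== PORT B =====
def pvFlipB (cube : PySem.Set String) : PySem.Set String :=
  if PySem.Set.contains cube "6" || PySem.Set.contains cube "9" then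
    PySem.Set.update cube ["6", "9"]
  else cube

def pvSplitHit (cube_0 cube_1 : PySem.Set String) (s : String) : Bool :=
  (PySem.List.pyRange 0 (PySem.Str.len s + 1) 1).any (fun i =>
    (PySem.Set.contains cube_0 (PySem.Str.slice s none (some i)) &&
     PySem.Set.contains cube_1 (PySem.Str.slice s (some i) none)) ||
    (PySem.Set.contains cube_1 (PySem.Str.slice s none (some i)) &&
     PySem.Set.contains cube_0 (PySem.Str.slice s (some i) none)))

def check_if_all_squares_are_covered_alt (cube_0 : List String) (cube_1 : List String) (lst_of_squares : List String) : Bool :=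
  let cube_0 := pvFlipB cube_0
  let cube_1 := pvFlipB cube_1
  lst_of_squares.all (pvSplitHit cube_0 cube_1)

-- ===== PRECONDITION & SPEC =====
def Spec_check_if_all_squares_are_covered (cube_0 : List String) (cube_1 : List String) (lst_of_squares : List String) (out : Bool) : Prop := out = check_if_all_squares_are_covered_alt cube_0 cube_1 lst_of_squares
instance (cube_0 : List String) (cube_1 : List String) (lst_of_squares : List String) (out : Bool) : Decidable (Spec_check_if_all_squares_are_covered cube_0 cube_1 lst_of_squares out) := by unfold Spec_check_if_all_squares_are_covered; infer_instance

-- ===== CLAIM (what is proved, stated in full; the proofs are below) =====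
def Claim_equal_check_if_all_squares_are_covered : Prop := ∀ (cube_0 : List String) (cube_1 : List String) (lst_of_squares : List String), Dom_check_if_all_squares_are_covered cube_0 cube_1 lst_of_squares → Spec_check_if_all_squares_are_covered cube_0 cube_1 lst_of_squares (check_if_all_squares_are_covered cube_0 cube_1 lst_of_squares)

-- ===== LEMMAS AND PROOFS =====

-- The two flip helpers produce the same list.
theorem flip_eq (cube : PySem.Set String) : flip_6_or_9 cube = pvFlipB cube := by
  unfold flip_6_or_9 pvFlipB
  rw [PySem.Set.update_cons, PySem.Set.update_cons, PySem.Set.update_nil]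
  by_cases h6 : ("6" : String) ∈ cube <;> by_cases h9 : ("9" : String) ∈ cube <;>
    simp [h6, h9]

-- membership characterisation of the inner fold of pvFormed
theorem mem_inner_fold (c1 : List String) (acc : List String) (d0 x : String) :
    x ∈ c1.foldl (fun acc d1 => PySem.Set.add (PySem.Set.add acc (d0 ++ d1)) (d1 ++ d0)) acc ↔
      x ∈ acc ∨ ∃ d1 ∈ c1, x = d0 ++ d1 ∨ x = d1 ++ d0 := by
  induction c1 generalizing acc with
  | nil => simp
  | cons d1 rest ih =>
      rw [List.foldl_cons, ih]
      simp [PySem.Set.mem_add, or_assoc]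

-- membership characterisation of pvFormed
theorem mem_formed_aux (c0 c1 acc : List String) (x : String) :
    x ∈ c0.foldl (fun acc d0 =>
        c1.foldl (fun acc d1 => PySem.Set.add (PySem.Set.add acc (d0 ++ d1)) (d1 ++ d0)) acc) acc ↔
      x ∈ acc ∨ ∃ d0 ∈ c0, ∃ d1 ∈ c1, x = d0 ++ d1 ∨ x = d1 ++ d0 := by
  induction c0 generalizing acc with
  | nil => simp
  | cons d0 rest ih =>
      rw [List.foldl_cons, ih, mem_inner_fold]
      constructor
      · rintro ((h | ⟨d1, h1, h2⟩) | ⟨a, ha, b, hb, hab⟩)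
        · exact Or.inl h
        · exact Or.inr ⟨d0, by simp, d1, h1, h2⟩
        · exact Or.inr ⟨a, by simp [ha], b, hb, hab⟩
      · rintro (h | ⟨a, ha, b, hb, hab⟩)
        · exact Or.inl (Or.inl h)
        · rcases List.mem_cons.mp ha with rfl | ha
          · exact Or.inl (Or.inr ⟨b, hb, hab⟩)
          · exact Or.inr ⟨a, ha, b, hb, hab⟩

theorem mem_formed (c0 c1 : List String) (x : String) :
    x ∈ pvFormed c0 c1 ↔ ∃ d0 ∈ c0, ∃ d1 ∈ c1, x = d0 ++ d1 ∨ x = d1 ++ d0 := by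
  unfold pvFormed
  rw [mem_formed_aux]
  simp [PySem.Set.empty]

-- swapping the cubes does not change B's per-square test
theorem pvSplitHit_comm (c0 c1 : List String) (s : String) :
    pvSplitHit c0 c1 s = pvSplitHit c1 c0 s := by
  unfold pvSplitHit
  congr 1
  funext i
  exact Bool.or_comm _ _

-- if s = p ++ q with p in c0 and q in c1, B's split search succeeds
theorem hit_of_parts (c0 c1 : List String) (s p q : String)
    (hp : p ∈ c0) (hq : q ∈ c1) (hs : s = p ++ q) :
    pvSplitHit c0 c1 s = true := by
  unfold pvSplitHit
  rw [List.any_eq_true]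
  have hlen : s.toList.length = p.toList.length + q.toList.length := by rw [hs]; simp
  refine ⟨(p.toList.length : Int), ?_, ?_⟩
  · rw [PySem.List.mem_pyRange_one, PySem.Str.len_eq]
    constructor
    · positivity
    · rw [hlen]; push_cast; omega
  · have e1 : PySem.Str.slice s none (some (p.toList.length : Int)) = p := by
      apply String.toList_injective
      rw [PySem.Str.toList_slice, PySem.Chars.slice_eq_listSlice,
        PySem.List.slice_to_natCast, hs, String.toList_append, List.take_left]
    have e2 : PySem.Str.slice s (some (p.toList.length : Int)) none = q := by
      apply String.toList_injective
      rw [PySem.Str.toList_slice, PySem.Chars.slice_eq_listSlice,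
        PySem.List.slice_from_natCast, hs, String.toList_append, List.drop_left]
    rw [e1, e2]
    simp [hp, hq]

-- B's split search finds exactly the concatenations A materialises
theorem splitHit_iff (c0 c1 : List String) (s : String) :
    pvSplitHit c0 c1 s = true ↔ ∃ d0 ∈ c0, ∃ d1 ∈ c1, s = d0 ++ d1 ∨ s = d1 ++ d0 := by
  constructor
  · intro h
    unfold pvSplitHit at h
    rw [List.any_eq_true] at h
    obtain ⟨i, hi, hpred⟩ := h
    rw [PySem.List.mem_pyRange_one] at hi
    obtain ⟨hi0, _⟩ := hi
    have hsplit : s = PySem.Str.slice s none (some i) ++ PySem.Str.slice s (some i) none := by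
      apply String.toList_injective
      rw [String.toList_append, PySem.Str.toList_slice, PySem.Str.toList_slice,
        PySem.Chars.slice_eq_listSlice, PySem.Chars.slice_eq_listSlice,
        PySem.List.slice_to _ hi0, PySem.List.slice_from _ hi0, List.take_append_drop]
    rcases Bool.or_eq_true_iff.mp hpred with hcase | hcase <;>
      obtain ⟨ha, hb⟩ := Bool.and_eq_true_iff.mp hcase
    · exact ⟨_, (PySem.Set.contains_iff _ _).mp ha, _, (PySem.Set.contains_iff _ _).mp hb,
        Or.inl hsplit⟩
    · exact ⟨_, (PySem.Set.contains_iff _ _).mp hb, _, (PySem.Set.contains_iff _ _).mp ha,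
        Or.inr hsplit⟩
  · rintro ⟨d0, h0, d1, h1, hs | hs⟩
    · exact hit_of_parts c0 c1 s d0 d1 h0 h1 hs
    · rw [pvSplitHit_comm]
      exact hit_of_parts c1 c0 s d1 d0 h1 h0 hs

-- A's early-return loop is List.all of membership
theorem loopA_eq_all (formed : PySem.Set String) (lst : List String) :
    pvLoopA formed lst = lst.all (fun s => PySem.Set.contains formed s) := by
  induction lst with
  | nil => rfl
  | cons s rest ih =>
      by_cases h : PySem.Set.contains formed s = true <;> simp [pvLoopA, ih]

-- ===== VERDICT (by name: the statement is the Claim_ definition above) =====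
theorem check_if_all_squares_are_covered_spec : Claim_equal_check_if_all_squares_are_covered := by
  intro c0 c1 lst _
  unfold Spec_check_if_all_squares_are_covered check_if_all_squares_are_covered
    check_if_all_squares_are_covered_alt
  rw [flip_eq c0, flip_eq c1, loopA_eq_all]
  rw [Bool.eq_iff_iff, List.all_eq_true, List.all_eq_true]
  refine forall_congr' (fun s => forall_congr' (fun _ => ?_))
  rw [PySem.Set.contains_iff, mem_formed, splitHit_iff]
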